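-- pv_equiv track=rewrite | github.com/aleksandragoryczka/advent-of-code | 2025/day02/task02.py | check_if_invalid
-- ===== SOURCE A (Python) =====
-- def check_if_invalid(value: str) -> int:
--     value_list = list(value)
--     for i in range(0, int(len(value_list)/2) + 1):
--         first_slice = value_list[:i]
--         if len(first_slice) > 0:
--             no_slices = len(value_list) / len(first_slice)
--             if int(no_slices) == no_slices:
--                 if first_slice * int(no_slices) == value_list:
--                     return int(value)
--     return 0
-- ===== SOURCE B (Python) =====
-- def check_if_invalid(value: str) -> int:
--     # string-rotation trick: value is a repetition of a shorter block
--     # iff it occurs inside (value+value) at a non-trivial offset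
--     if value and value in (value + value)[1:-1]:
--         return int(value)
--     return 0
-- ===== Notes on version B (the rewrite author's own statement) =====
-- stated objective: faster
-- what changed: Replaces the loop over all candidate block lengths with slice-multiplication checks by the single string-rotation membership test `value in (value+value)[1:-1]`.
import Mathlib
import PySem

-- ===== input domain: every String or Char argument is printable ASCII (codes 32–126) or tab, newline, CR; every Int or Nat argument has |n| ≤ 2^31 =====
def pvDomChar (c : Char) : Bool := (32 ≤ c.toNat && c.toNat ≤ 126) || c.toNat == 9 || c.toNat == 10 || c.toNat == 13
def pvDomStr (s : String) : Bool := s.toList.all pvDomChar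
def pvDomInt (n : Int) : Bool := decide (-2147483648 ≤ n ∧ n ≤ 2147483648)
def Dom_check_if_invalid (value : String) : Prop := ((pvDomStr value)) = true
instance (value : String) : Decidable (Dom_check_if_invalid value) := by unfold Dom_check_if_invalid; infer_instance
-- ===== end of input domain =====

-- B replaces A's scan over all candidate block lengths (with slice multiplication) by the
-- single string-rotation membership test `value in (value+value)[1:-1]` (objective: faster).

-- ===== PORT A =====
-- literal transliteration of A; notes on exactness:
--   * `value_list[:i]` with i ≥ 0 is `take i` (PySem.List.slice_to_natCast)
--   * `int(len(value_list)/2)` : float true division then truncation; exact = n / 2 (Nat division)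
--   * `no_slices = len/len; int(no_slices) == no_slices` : the float quotient is integral iff the
--     divisor divides the dividend (exact at these magnitudes), ported as `k * i = n` with k = n / i
--   * `first_slice * int(no_slices)` (list repetition) is `List.flatten (List.replicate k fs)`
--   * `int(value)` raises ValueError when PySem.Int.ofStr? = none; those inputs are excluded by
--     Pre_check_if_invalid, so `.getD 0` is never reached outside Pre_
def check_if_invalid (value : String) : Int :=
  let value_list := value.toList
  match (List.range (value_list.length / 2 + 1)).findSome? (fun i =>
      let first_slice := value_list.take i
      if first_slice.length > 0 then
        let no_slices := value_list.length / first_slice.length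
        if no_slices * first_slice.length = value_list.length then
          if List.flatten (List.replicate no_slices first_slice) = value_list then
            some ((PySem.Int.ofStr? value).getD 0)
          else none
        else none
      else none) with
  | some r => r
  | none => 0

-- ===== PORT B =====
-- literal transliteration of Source B: `if value and value in (value+value)[1:-1]: return int(value); return 0`
-- (string concatenation / slicing / membership on code points; `int(value)` as in port A)
def check_if_invalid_alt (value : String) : Int :=
  let doubled := value.toList ++ value.toList
  let middle := PySem.List.slice doubled (some 1) (some (-1))
  if value.toList ≠ [] ∧ PySem.Chars.isIn value.toList middle = true then
    (PySem.Int.ofStr? value).getD 0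
  else 0

-- ===== PRECONDITION & SPEC =====
-- Pre_ excludes exactly the inputs on which A raises ValueError: strings that ARE a repetition of a
-- shorter block but are not a valid Python int literal (e.g. "abab"), where `int(value)` fails.
-- (B raises the same ValueError there.)
def Pre_check_if_invalid (value : String) : Prop :=
  (∃ i < value.toList.length, 1 ≤ i ∧
      List.flatten (List.replicate (value.toList.length / i) (value.toList.take i)) = value.toList)
  → PySem.Int.ofStr? value ≠ none
instance (value : String) : Decidable (Pre_check_if_invalid value) := by
  unfold Pre_check_if_invalid; infer_instance
def pvWitness_check_if_invalid : String := "11"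

def Spec_check_if_invalid (value : String) (out : Int) : Prop := out = check_if_invalid_alt value
instance (value : String) (out : Int) : Decidable (Spec_check_if_invalid value out) := by unfold Spec_check_if_invalid; infer_instance

-- ===== CLAIM (what is proved, stated in full; the proofs are below) =====
def Claim_equal_check_if_invalid : Prop := ∀ (value : String), Dom_check_if_invalid value → Pre_check_if_invalid value → Spec_check_if_invalid value (check_if_invalid value)

-- ===== LEMMAS AND PROOFS =====

-- ===== VERDICT (by name: the statement is the Claim_ definition above) =====


-- slice (s++s)[1:-1] computed as drop/take
theorem pv_slice_mid (xs : List Char) :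
    PySem.List.slice xs (some 1) (some (-1)) = (xs.drop 1).take (xs.length - 1 - 1) := by
  rcases eq_or_ne xs [] with h | h
  · subst h; simp [PySem.List.slice, PySem.List.clampIdx]
  · have hn : 1 ≤ xs.length := List.length_pos_of_ne_nil h
    simp only [PySem.List.slice, PySem.List.clampIdx]
    norm_num
    have h1 : min 1 xs.length = 1 := Nat.min_eq_left hn
    have h2 : ((xs.length : Int) + -1).toNat = xs.length - 1 := by omega
    rw [h1, h2, List.drop_one, if_neg h]

-- occurrence of s inside s++s at offset j ≤ |s| is exactly a fixed rotation
theorem pv_prefix_drop_double (s : List Char) (j : ℕ) (hj : j ≤ s.length) :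
    s <+: (s ++ s).drop j ↔ s.rotate j = s := by
  have hd : (s ++ s).drop j = s.drop j ++ s := by
    rw [List.drop_append, Nat.sub_eq_zero_of_le hj, List.drop_zero]
  have harith : s.length - (s.length - j) = j := by omega
  have htake : (s.drop j ++ s).take s.length = s.drop j ++ s.take j := by
    rw [List.take_append, List.take_of_length_le (by simp), List.length_drop, harith]
  rw [hd, List.prefix_iff_eq_take, htake,
      List.rotate_eq_drop_append_take hj]
  exact eq_comm

theorem pv_rotate_mul (s : List Char) (d q : ℕ) (h : s.rotate d = s) :
    s.rotate (q * d) = s := by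
  induction q with
  | zero => simp
  | succ q ih =>
    have : s.rotate (q * d + d) = (s.rotate (q * d)).rotate d := (List.rotate_rotate s _ _).symm
    rw [Nat.succ_mul, this, ih, h]

-- a list fixed by a rotation by d with d ∣ length is the (length/d)-fold repetition of its d-prefix
theorem pv_power_of_rotate (k : ℕ) : ∀ (s : List Char) (d : ℕ), 0 < d →
    s.length = k * d → s.rotate d = s → s = (List.replicate k (s.take d)).flatten := by
  induction k with
  | zero =>
    intro s d _ hlen _
    have : s = [] := List.eq_nil_of_length_eq_zero (by simpa using hlen)
    simp [this]
  | succ k ih =>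
    intro s d hd hlen hrot
    have hdn : d ≤ s.length := by rw [hlen]; calc d = 1 * d := (Nat.one_mul d).symm
                                                 _ ≤ (k+1) * d := Nat.mul_le_mul_right d (by omega)
    set u := s.take d with hu
    set t := s.drop d with ht
    have hs : u ++ t = s := List.take_append_drop d s
    have hcomm : t ++ u = u ++ t := by
      rw [hs]; rw [List.rotate_eq_drop_append_take hdn] at hrot; exact hrot
    have hul : u.length = d := by rw [hu, List.length_take]; omega
    have htl : t.length = k * d := by
      rw [ht, List.length_drop, hlen, Nat.succ_mul]; omega
    rcases Nat.eq_zero_or_pos k with hk | hk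
    · subst hk
      have : t = [] := List.eq_nil_of_length_eq_zero (by simpa using htl)
      rw [← hs, this]; simp
    · have hdt : d ≤ t.length := by rw [htl]; calc d = 1 * d := (Nat.one_mul d).symm
                                                   _ ≤ k * d := Nat.mul_le_mul_right d hk
      have htu : t.take d = u := by
        have h1 : (t ++ u).take d = t.take d := List.take_append_of_le_length hdt
        have h2 : (u ++ t).take d = u := List.take_left' hul
        rw [hcomm, h2] at h1; exact h1.symm
      have hdu : t.drop d ++ u = t := by
        have h1 : (t ++ u).drop d = t.drop d ++ u := by
          rw [List.drop_append, Nat.sub_eq_zero_of_le hdt, List.drop_zero]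
        have h2 : (u ++ t).drop d = t := List.drop_left' hul
        rw [hcomm, h2] at h1; exact h1.symm
      have hrt : t.rotate d = t := by
        rw [List.rotate_eq_drop_append_take hdt, htu, hdu]
      have := ih t d hd htl hrt
      rw [htu] at this
      rw [← hs, List.replicate_succ, List.flatten_cons, ← this]

-- from any nontrivial fixed rotation, one whose amount divides the length and is ≤ length/2
theorem pv_exists_div (s : List Char) (h : ∃ j, 1 ≤ j ∧ j < s.length ∧ s.rotate j = s) :
    ∃ i, 1 ≤ i ∧ i ≤ s.length / 2 ∧ i ∣ s.length ∧ s.rotate i = s := by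
  set d := Nat.find h with hd
  obtain ⟨hd1, hdn, hrot⟩ := Nat.find_spec h
  have hmod : s.rotate (s.length % d) = s := by
    have h2 := List.rotate_rotate s (s.length / d * d) (s.length % d)
    rw [pv_rotate_mul s d (s.length / d) hrot] at h2
    have h3 := Nat.div_add_mod s.length d
    rw [Nat.mul_comm] at h3
    rw [h3, List.rotate_length] at h2
    exact h2
  have hr0 : s.length % d = 0 := by
    by_contra hne
    have hrlt : s.length % d < d := Nat.mod_lt _ (by omega)
    have : ¬ (1 ≤ s.length % d ∧ s.length % d < s.length ∧ s.rotate (s.length % d) = s) :=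
      Nat.find_min h hrlt
    exact this ⟨by omega, by omega, hmod⟩
  have hdvd : d ∣ s.length := Nat.dvd_of_mod_eq_zero hr0
  refine ⟨d, hd1, ?_, hdvd, hrot⟩
  obtain ⟨m, hm⟩ := hdvd
  have hm2 : 2 ≤ m := by
    rcases Nat.lt_or_ge m 2 with h2 | h2
    · interval_cases m <;> omega
    · exact h2
  have : d * 2 ≤ s.length := by rw [hm]; exact Nat.mul_le_mul_left d hm2
  omega
-- B's guard (nonempty ∧ member of the doubled-string middle) ⟺ a nontrivial fixed rotation
theorem pv_B_cond_iff (s : List Char) :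
    (s ≠ [] ∧ PySem.Chars.isIn s (PySem.List.slice (s ++ s) (some 1) (some (-1))) = true)
    ↔ (∃ j, 1 ≤ j ∧ j < s.length ∧ s.rotate j = s) := by
  rw [pv_slice_mid, ← PySem.Chars.exists_prefix_drop_iff_isIn]
  have hlen : (s ++ s).length = s.length + s.length := by simp
  constructor
  · rintro ⟨hne, j, hpre⟩
    have hn : 1 ≤ s.length := List.length_pos_of_ne_nil hne
    rw [List.drop_take, List.drop_drop] at hpre
    rw [List.prefix_take_iff] at hpre
    obtain ⟨hp, hlenle⟩ := hpre
    rw [hlen] at hlenle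
    have hj : 1 + j ≤ s.length := by omega
    exact ⟨1 + j, by omega, by omega, (pv_prefix_drop_double s (1 + j) hj).mp hp⟩
  · rintro ⟨j, h1, h2, hrot⟩
    have hn : 2 ≤ s.length := by omega
    refine ⟨by intro h; rw [h] at hn; simp at hn, j - 1, ?_⟩
    rw [List.drop_take, List.drop_drop, List.prefix_take_iff]
    have hj : 1 + (j - 1) = j := by omega
    rw [hj, hlen]
    exact ⟨(pv_prefix_drop_double s j (by omega)).mpr hrot, by omega⟩

-- A's success condition (some admissible block length works) ⟺ a nontrivial fixed rotation
theorem pv_A_cond_iff (s : List Char) :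
    (∃ i, i < s.length / 2 + 1 ∧ 0 < (s.take i).length ∧
        s.length / (s.take i).length * (s.take i).length = s.length ∧
        List.flatten (List.replicate (s.length / (s.take i).length) (s.take i)) = s)
    ↔ (∃ j, 1 ≤ j ∧ j < s.length ∧ s.rotate j = s) := by
  constructor
  · rintro ⟨i, hir, hpos, hdiv, hflat⟩
    have hi2 : i ≤ s.length / 2 := by omega
    have hin : i ≤ s.length := le_trans hi2 (Nat.div_le_self _ _)
    have hlt : (s.take i).length = i := by rw [List.length_take]; omega
    rw [hlt] at hpos hdiv hflat
    set k := s.length / i with hk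
    have hk2 : 2 ≤ k := by
      by_contra hlt2
      have : s.length ≤ i := by
        calc s.length = k * i := hdiv.symm
          _ ≤ 1 * i := Nat.mul_le_mul_right i (by omega)
          _ = i := Nat.one_mul i
      omega
    have hilt : i < s.length := by
      have h2i : 2 * i ≤ k * i := Nat.mul_le_mul_right i hk2
      rw [hdiv] at h2i; omega
    refine ⟨i, by omega, hilt, ?_⟩
    rw [List.rotate_eq_drop_append_take hin]
    have hks : k = (k - 1) + 1 := by omega
    have hu : (s.take i).length = i := hlt
    rw [hks, List.replicate_succ, List.flatten_cons] at hflat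
    have hdrop : s.drop i = List.flatten (List.replicate (k - 1) (s.take i)) := by
      conv_lhs => rw [← hflat]
      rw [List.drop_left' hu]
    rw [hdrop]
    have hmerge : List.flatten (List.replicate (k - 1) (s.take i)) ++ s.take i
        = s.take i ++ List.flatten (List.replicate (k - 1) (s.take i)) := by
      have h1 : List.flatten (List.replicate (k - 1) (s.take i)) ++ s.take i
          = List.flatten (List.replicate (k - 1) (s.take i) ++ [s.take i]) := by
        rw [List.flatten_append, List.flatten_cons, List.flatten_nil, List.append_nil]
      have h2 : List.replicate (k - 1) (s.take i) ++ [s.take i]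
          = List.replicate ((k - 1) + 1) (s.take i) := List.replicate_succ'.symm
      have h3 : List.replicate ((k - 1) + 1) (s.take i)
          = s.take i :: List.replicate (k - 1) (s.take i) := List.replicate_succ
      rw [h1, h2, h3, List.flatten_cons]
    rw [hmerge, hflat]
  · intro h
    obtain ⟨i, h1, h2, hdvd, hrot⟩ := pv_exists_div s h
    have hn : 0 < s.length := by obtain ⟨j, hj1, hj2, _⟩ := h; omega
    have hin : i ≤ s.length := le_trans h2 (Nat.div_le_self _ _)
    have hlt : (s.take i).length = i := by rw [List.length_take]; omega
    have hmul : s.length / i * i = s.length := Nat.div_mul_cancel hdvd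
    have hpow := pv_power_of_rotate (s.length / i) s i (by omega) hmul.symm hrot
    exact ⟨i, by omega, by rw [hlt]; exact ⟨by omega, hmul, hpow.symm⟩⟩
-- evaluation of A's search loop: it returns v iff some admissible block length succeeds
theorem pv_findSome_eval (s : List Char) (v : Int) :
    (match (List.range (s.length / 2 + 1)).findSome? (fun i =>
        let first_slice := s.take i
        if first_slice.length > 0 then
          let no_slices := s.length / first_slice.length
          if no_slices * first_slice.length = s.length then
            if List.flatten (List.replicate no_slices first_slice) = s then some v
            else none
          else none
        else none) with
      | some r => r
      | none => 0)
    = if (∃ i, i < s.length / 2 + 1 ∧ 0 < (s.take i).length ∧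
            s.length / (s.take i).length * (s.take i).length = s.length ∧
            List.flatten (List.replicate (s.length / (s.take i).length) (s.take i)) = s)
      then v else 0 := by
  set f : ℕ → Option Int := fun i =>
        let first_slice := s.take i
        if first_slice.length > 0 then
          let no_slices := s.length / first_slice.length
          if no_slices * first_slice.length = s.length then
            if List.flatten (List.replicate no_slices first_slice) = s then some v
            else none
          else none
        else none with hfdef
  cases hfs : (List.range (s.length / 2 + 1)).findSome? f with
  | none =>
    rw [if_neg]
    rintro ⟨i, hir, hc1, hc2, hc3⟩
    have hnone := List.findSome?_eq_none_iff.mp hfs i (List.mem_range.mpr hir)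
    simp only [hfdef] at hnone
    rw [if_pos hc1, if_pos hc2, if_pos hc3] at hnone
    exact absurd hnone (by simp)
  | some r =>
    obtain ⟨i, hmem, hfi⟩ := List.exists_of_findSome?_eq_some hfs
    simp only [hfdef] at hfi
    split_ifs at hfi with h1 h2 h3
    · cases hfi
      rw [if_pos ⟨i, List.mem_range.mp hmem, h1, h2, h3⟩]
-- ===== VERDICT (by name: the statement is the Claim_ definition above) =====
theorem check_if_invalid_spec : Claim_equal_check_if_invalid := by
  intro value _ _
  unfold Spec_check_if_invalid
  have hA : check_if_invalid value =
      if (∃ i, i < value.toList.length / 2 + 1 ∧ 0 < (value.toList.take i).length ∧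
            value.toList.length / (value.toList.take i).length * (value.toList.take i).length
              = value.toList.length ∧
            List.flatten (List.replicate
              (value.toList.length / (value.toList.take i).length) (value.toList.take i))
              = value.toList)
      then (PySem.Int.ofStr? value).getD 0 else 0 :=
    pv_findSome_eval value.toList ((PySem.Int.ofStr? value).getD 0)
  have hB : check_if_invalid_alt value =
      if (value.toList ≠ [] ∧ PySem.Chars.isIn value.toList
            (PySem.List.slice (value.toList ++ value.toList) (some 1) (some (-1))) = true)
      then (PySem.Int.ofStr? value).getD 0 else 0 := rfl
  rw [hA, hB]
  exact if_congr ((pv_A_cond_iff value.toList).trans (pv_B_cond_iff value.toList).symm) rfl rfl
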